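-- pv_equiv track=rewrite | github.com/monika0603/lovely-python | breaking_boundaries.py | _breaking_boundaries
-- ===== SOURCE A (Python) =====
-- def _breaking_boundaries(m, n, k, r, c):
--
--     row_inbounds = 0 <= r < m
--     col_inbounds = 0 <= c < n
--
--     if not row_inbounds or not col_inbounds:
--         return 1
--
--     if k == 0:
--         return 0
--
--     count = 0
--     deltas = [(-1,0), (1,0), (0,-1), (0,1)]
--     for delta in deltas:
--         dx, dy = delta
--         count += _breaking_boundaries(m, n, k-1, r+dy, c+dx)
--
--     return count
-- ===== SOURCE B (Python) =====
-- def _breaking_boundaries(m, n, k, r, c):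
--     # Layered DP over a shrinking Chebyshev window around the start instead of
--     # the 4-way exponential recursion.
--     if not (0 <= r < m and 0 <= c < n):
--         return 1
--     prev = {}
--     for j in range(1, k + 1):
--         d = k - j
--         cur = {(rr, cc): _exit_sum(m, n, prev, rr, cc)
--                for rr in range(max(0, r - d), min(m, r + d + 1))
--                for cc in range(max(0, c - d), min(n, c + d + 1))}
--         prev = cur
--     return prev.get((r, c), 0)
--
--
-- def _exit_sum(m, n, prev, rr, cc):
--     t = 0
--     for nr, nc in ((rr - 1, cc), (rr + 1, cc), (rr, cc - 1), (rr, cc + 1)):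
--         if 0 <= nr < m and 0 <= nc < n:
--             t += prev.get((nr, nc), 0)
--         else:
--             t += 1
--     return t
-- ===== Notes on version B (the rewrite author's own statement) =====
-- stated objective: alternative
-- what changed: Replaces the 4-way exponential recursion by an iterative layered DP: for each remaining-step count it tabulates, in a dict over a Chebyshev window around the start that shrinks as steps remain, the number of exiting walks, so each state is computed once (exponentially fewer states in k; not certified faster in a timing run, whose largest inputs exhaust both).
-- outside the precondition, e.g. on _breaking_boundaries(1, 1, -1, 0, 0): A returns 4, B returns 0; on _breaking_boundaries(2, 1, -1, 0, 0): A raises RecursionError, B returns 0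
import Mathlib
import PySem

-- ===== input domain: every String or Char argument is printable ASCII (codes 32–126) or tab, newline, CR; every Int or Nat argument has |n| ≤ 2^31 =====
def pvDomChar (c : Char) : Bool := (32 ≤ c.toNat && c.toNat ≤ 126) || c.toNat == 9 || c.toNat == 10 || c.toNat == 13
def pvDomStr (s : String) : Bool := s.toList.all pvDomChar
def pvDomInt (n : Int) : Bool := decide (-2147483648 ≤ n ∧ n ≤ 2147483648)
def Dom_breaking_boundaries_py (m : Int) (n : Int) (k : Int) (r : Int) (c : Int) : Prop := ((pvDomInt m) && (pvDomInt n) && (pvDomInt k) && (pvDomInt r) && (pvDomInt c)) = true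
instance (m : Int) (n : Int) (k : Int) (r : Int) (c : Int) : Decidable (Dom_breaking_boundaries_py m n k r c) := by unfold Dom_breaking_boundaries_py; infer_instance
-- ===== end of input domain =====

-- B replaces A's 4-way exponential recursion by a layered dict DP over a shrinking
-- Chebyshev window around the start, so each (steps, cell) state is computed once.


-- ===== PORT A =====
-- A's recursion, with the recursion depth as a Nat fuel (= k.toNat; exact on Pre_,
-- where k ≥ 0 whenever the start is in bounds, so the k == 0 test is fuel = 0).
def pvBBA (m n : Int) : Nat → Int → Int → Int
  | fuel, r, c =>
    if ¬(0 ≤ r ∧ r < m) ∨ ¬(0 ≤ c ∧ c < n) then 1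
    else
      match fuel with
      | 0 => 0
      | fuel + 1 =>
        -- deltas in A's order; A adds (r+dy, c+dx) for delta = (dx, dy)
        [((-1 : Int), (0 : Int)), (1, 0), (0, -1), (0, 1)].foldl
          (fun count δ => count + pvBBA m n fuel (r + δ.2) (c + δ.1)) 0

def breaking_boundaries_py (m : Int) (n : Int) (k : Int) (r : Int) (c : Int) : Int :=
  pvBBA m n k.toNat r c

-- ===== PORT B =====
-- B helper _exit_sum: four neighbours; out-of-bounds contributes 1, else prev.get(nbr, 0)
def pvExitSum (m n : Int) (prev : PySem.Dict (Int × Int) Int) (rr cc : Int) : Int :=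
  [(rr - 1, cc), (rr + 1, cc), (rr, cc - 1), (rr, cc + 1)].foldl
    (fun t p => if 0 ≤ p.1 ∧ p.1 < m ∧ 0 ≤ p.2 ∧ p.2 < n then t + prev.getD p 0 else t + 1) 0

-- the cell list of the dict comprehension: (rr, cc) for rr in range(r1, r2) for cc in range(c1, c2)
def pvCells (r1 r2 c1 c2 : Int) : List (Int × Int) :=
  (PySem.List.pyRange r1 r2 1).flatMap
    (fun rr => (PySem.List.pyRange c1 c2 1).map (fun cc => (rr, cc)))

-- one iteration of B's j-loop: the dict comprehension over the clipped window of radius d = k - j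
def pvLayer (m n r c k : Int) (prev : PySem.Dict (Int × Int) Int) (j : Int) :
    PySem.Dict (Int × Int) Int :=
  let d := k - j
  (pvCells (max 0 (r - d)) (min m (r + d + 1)) (max 0 (c - d)) (min n (c + d + 1))).foldl
    (fun acc p => acc.insert p (pvExitSum m n prev p.1 p.2)) PySem.Dict.empty

def breaking_boundaries_py_alt (m : Int) (n : Int) (k : Int) (r : Int) (c : Int) : Int :=
  if ¬(0 ≤ r ∧ r < m ∧ 0 ≤ c ∧ c < n) then 1
  else
    ((PySem.List.pyRange 1 (k + 1) 1).foldl (pvLayer m n r c k) PySem.Dict.empty).getD (r, c) 0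

-- ===== PRECONDITION & SPEC =====
-- Pre_ requires k ≥ 0 whenever the start is in bounds: for negative k A recurses with no
-- base case — raising RecursionError on any grid with a second cell, and returning an
-- accidental 4 on the 1×1 grid — outside the natural domain of nonnegative step counts.
def Pre_breaking_boundaries_py (m : Int) (n : Int) (k : Int) (r : Int) (c : Int) : Prop :=
  0 ≤ k ∨ ¬(0 ≤ r ∧ r < m ∧ 0 ≤ c ∧ c < n)
instance (m : Int) (n : Int) (k : Int) (r : Int) (c : Int) : Decidable (Pre_breaking_boundaries_py m n k r c) := by unfold Pre_breaking_boundaries_py; infer_instance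

def pvWitness_breaking_boundaries_py : Int × Int × Int × Int × Int := (3, 3, 2, 1, 1)

def Spec_breaking_boundaries_py (m : Int) (n : Int) (k : Int) (r : Int) (c : Int) (out : Int) : Prop := out = breaking_boundaries_py_alt m n k r c
instance (m : Int) (n : Int) (k : Int) (r : Int) (c : Int) (out : Int) : Decidable (Spec_breaking_boundaries_py m n k r c out) := by unfold Spec_breaking_boundaries_py; infer_instance

-- ===== CLAIM (what is proved, stated in full; the proofs are below) =====
def Claim_equal_breaking_boundaries_py : Prop := ∀ (m : Int) (n : Int) (k : Int) (r : Int) (c : Int), Dom_breaking_boundaries_py m n k r c → Pre_breaking_boundaries_py m n k r c → Spec_breaking_boundaries_py m n k r c (breaking_boundaries_py m n k r c)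

-- ===== LEMMAS AND PROOFS =====

-- B's loop, unrolled by layer count: pvIter j = the dict after the first j iterations
def pvIter (m n r c k : Int) : Nat → PySem.Dict (Int × Int) Int
  | 0 => PySem.Dict.empty
  | j + 1 => pvLayer m n r c k (pvIter m n r c k j) (1 + j)

lemma foldl_insert_getD (g : Int × Int → Int) :
    ∀ (L : List (Int × Int)) (acc : PySem.Dict (Int × Int) Int) (q : Int × Int),
      (L.foldl (fun a p => a.insert p (g p)) acc).getD q 0 =
        if q ∈ L then g q else acc.getD q 0 := by
  intro L
  induction L with
  | nil => intro acc q; simp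
  | cons p T ih =>
      intro acc q
      simp only [List.foldl_cons, ih, List.mem_cons]
      by_cases hT : q ∈ T
      · simp [hT]
      · simp [hT, PySem.Dict.getD_insert]
        by_cases hp : q = p <;> simp [hp]

lemma mem_pvCells {r1 r2 c1 c2 : Int} {q : Int × Int} :
    q ∈ pvCells r1 r2 c1 c2 ↔ (r1 ≤ q.1 ∧ q.1 < r2 ∧ c1 ≤ q.2 ∧ q.2 < c2) := by
  obtain ⟨a, b⟩ := q
  simp [pvCells, PySem.List.mem_pyRange_one]
  tauto

lemma pvBBA_out {m n : Int} {fuel : Nat} {r c : Int}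
    (h : ¬(0 ≤ r ∧ r < m ∧ 0 ≤ c ∧ c < n)) : pvBBA m n fuel r c = 1 := by
  cases fuel <;> rw [pvBBA] <;> rw [if_pos (by tauto)]

lemma pvBBA_succ {m n : Int} {fuel : Nat} {r c : Int}
    (h : 0 ≤ r ∧ r < m ∧ 0 ≤ c ∧ c < n) :
    pvBBA m n (fuel + 1) r c =
      pvBBA m n fuel r (c - 1) + pvBBA m n fuel r (c + 1) +
      pvBBA m n fuel (r - 1) c + pvBBA m n fuel (r + 1) c := by
  rw [pvBBA]
  rw [if_neg (by tauto)]
  simp only [List.foldl_cons, List.foldl_nil]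
  norm_num [Int.sub_eq_add_neg]

-- the exit-sum of B's helper equals A's one-step recursion, given prev correct on neighbours
lemma pvExitSum_eq {m n : Int} {prev : PySem.Dict (Int × Int) Int} {j : Nat} {rr cc : Int}
    (hin : 0 ≤ rr ∧ rr < m ∧ 0 ≤ cc ∧ cc < n)
    (hprev : ∀ x y : Int, (0 ≤ x ∧ x < m ∧ 0 ≤ y ∧ y < n) →
      (x = rr - 1 ∧ y = cc) ∨ (x = rr + 1 ∧ y = cc) ∨ (x = rr ∧ y = cc - 1) ∨ (x = rr ∧ y = cc + 1) →
      prev.getD (x, y) 0 = pvBBA m n j x y) :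
    pvExitSum m n prev rr cc = pvBBA m n (j + 1) rr cc := by
  rw [pvBBA_succ hin]
  simp only [pvExitSum, List.foldl_cons, List.foldl_nil]
  have s1 : ∀ t : Int, (if 0 ≤ rr - 1 ∧ rr - 1 < m ∧ 0 ≤ cc ∧ cc < n then t + prev.getD (rr - 1, cc) 0 else t + 1) = t + pvBBA m n j (rr - 1) cc := by
    intro t; split_ifs with h
    · rw [hprev _ _ h (Or.inl ⟨rfl, rfl⟩)]
    · rw [pvBBA_out h]
  have s2 : ∀ t : Int, (if 0 ≤ rr + 1 ∧ rr + 1 < m ∧ 0 ≤ cc ∧ cc < n then t + prev.getD (rr + 1, cc) 0 else t + 1) = t + pvBBA m n j (rr + 1) cc := by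
    intro t; split_ifs with h
    · rw [hprev _ _ h (Or.inr (Or.inl ⟨rfl, rfl⟩))]
    · rw [pvBBA_out h]
  have s3 : ∀ t : Int, (if 0 ≤ rr ∧ rr < m ∧ 0 ≤ cc - 1 ∧ cc - 1 < n then t + prev.getD (rr, cc - 1) 0 else t + 1) = t + pvBBA m n j rr (cc - 1) := by
    intro t; split_ifs with h
    · rw [hprev _ _ h (Or.inr (Or.inr (Or.inl ⟨rfl, rfl⟩)))]
    · rw [pvBBA_out h]
  have s4 : ∀ t : Int, (if 0 ≤ rr ∧ rr < m ∧ 0 ≤ cc + 1 ∧ cc + 1 < n then t + prev.getD (rr, cc + 1) 0 else t + 1) = t + pvBBA m n j rr (cc + 1) := by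
    intro t; split_ifs with h
    · rw [hprev _ _ h (Or.inr (Or.inr (Or.inr ⟨rfl, rfl⟩)))]
    · rw [pvBBA_out h]
  rw [s1, s2, s3, s4]
  ring

-- invariant: after j layers, the dict holds A's j-step values on the radius-(K-j) window
lemma pvIter_correct {m n k : Int} {r c : Int}
    (hin : 0 ≤ r ∧ r < m ∧ 0 ≤ c ∧ c < n) :
    ∀ j : Nat, j ≤ k.toNat → ∀ rr cc : Int,
      (0 ≤ rr ∧ rr < m ∧ 0 ≤ cc ∧ cc < n) →
      rr - r ≤ k - j → r - rr ≤ k - j → cc - c ≤ k - j → c - cc ≤ k - j →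
      (pvIter m n r c k j).getD (rr, cc) 0 = pvBBA m n j rr cc := by
  intro j
  induction j with
  | zero =>
      intro _ rr cc hinb _ _ _ _
      show (PySem.Dict.empty).getD (rr, cc) 0 = pvBBA m n 0 rr cc
      rw [pvBBA, if_neg (by tauto)]
      simp [PySem.Dict.getD_empty]
  | succ j ih =>
      intro hle rr cc hinb h1 h2 h3 h4
      show (pvLayer m n r c k (pvIter m n r c k j) (1 + (j : Int))).getD (rr, cc) 0 = _
      simp only [pvLayer, foldl_insert_getD]
      have hd : k - (1 + (j : Int)) = k - ((j : Int) + 1) := by ring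
      have hmem : (rr, cc) ∈ pvCells (max 0 (r - (k - (1 + (j : Int))))) (min m (r + (k - (1 + (j : Int))) + 1)) (max 0 (c - (k - (1 + (j : Int))))) (min n (c + (k - (1 + (j : Int))) + 1)) := by
        rw [mem_pvCells]
        push_cast at h1 h2 h3 h4
        constructor
        · omega
        constructor
        · omega
        constructor
        · omega
        · omega
      rw [if_pos hmem]
      apply pvExitSum_eq hinb
      intro x y hxy hnbr
      push_cast at h1 h2 h3 h4
      have hdist : x - r ≤ k - (j : Int) ∧ r - x ≤ k - (j : Int) ∧ y - c ≤ k - (j : Int) ∧ c - y ≤ k - (j : Int) := by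
        rcases hnbr with ⟨hx, hy⟩ | ⟨hx, hy⟩ | ⟨hx, hy⟩ | ⟨hx, hy⟩ <;> subst hx <;> subst hy <;> omega
      exact ih (by omega) x y hxy hdist.1 hdist.2.1 hdist.2.2.1 hdist.2.2.2

lemma pyRange_foldl_eq_pvIter (m n r c k : Int) :
    (PySem.List.pyRange 1 (k + 1) 1).foldl (pvLayer m n r c k) PySem.Dict.empty =
      pvIter m n r c k k.toNat := by
  rw [PySem.List.pyRange_one, show k + 1 - 1 = k from by ring, List.foldl_map]
  generalize k.toNat = K
  induction K with
  | zero => rfl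
  | succ j ih => rw [List.range_succ, List.foldl_append, ih]; rfl

-- ===== VERDICT (by name: the statement is the Claim_ definition above) =====
theorem breaking_boundaries_py_spec : Claim_equal_breaking_boundaries_py := by
  intro m n k r c _ hpre
  unfold Spec_breaking_boundaries_py breaking_boundaries_py breaking_boundaries_py_alt
  by_cases hin : 0 ≤ r ∧ r < m ∧ 0 ≤ c ∧ c < n
  · have hk : 0 ≤ k := by rcases hpre with h | h; exacts [h, absurd hin h]
    rw [if_neg (by tauto), pyRange_foldl_eq_pvIter m n r c k]
    rw [pvIter_correct hin k.toNat le_rfl r c hin (by omega) (by omega) (by omega) (by omega)]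
  · rw [if_pos (by tauto), pvBBA_out hin]
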